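-- pv_equiv track=rewrite | github.com/pypi-data/pypi-mirror-350 | packages/rccn-gen/rccn_gen-1.3.3.tar.gz/rccn_gen-1.3.3/src/rccn_gen/utils.py | engineering_bit_number
-- ===== SOURCE A (Python) =====
-- def engineering_bit_number(raw_bit_number):
--     """
--     Calculate an appropriate engineering bit width based on a raw bit width.
--
--     Rounds up the raw bit width to the next power of 2, with a minimum of 8 bits.
--
--     Parameters:
--     -----------
--     raw_bit_number : int
--         The raw bit width (1-128).
--
--     Returns:
--     --------
--     int
--         The calculated engineering bit width (a power of 2, minimum 8).
--
--     Raises: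
--     -------
--     ValueError
--         If raw_bit_number is not between 1 and 128.
--     """
--     if raw_bit_number < 1 or raw_bit_number > 128:
--         raise ValueError("raw_bit_number must be between 1 and 128")
--     power = 1
--     while 2**power < raw_bit_number:
--         power += 1
--     bit_number = 2**power
--     if bit_number < 8:
--         bit_number = 8
--     return (bit_number)
-- ===== SOURCE B (Python) =====
-- def engineering_bit_number(raw_bit_number):
--     if raw_bit_number < 1 or raw_bit_number > 128:
--         raise ValueError("raw_bit_number must be between 1 and 128")
--     return max(8, 1 << (raw_bit_number - 1).bit_length())
-- ===== Notes on version B (the rewrite author's own statement) =====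
-- stated objective: idiomatic
-- what changed: Replaced the while-loop that doubles a power until it reaches the input (plus a post-hoc clamp) by a closed form: a shift by (raw_bit_number - 1).bit_length(), clamped to a minimum of eight via max.
import Mathlib
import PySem

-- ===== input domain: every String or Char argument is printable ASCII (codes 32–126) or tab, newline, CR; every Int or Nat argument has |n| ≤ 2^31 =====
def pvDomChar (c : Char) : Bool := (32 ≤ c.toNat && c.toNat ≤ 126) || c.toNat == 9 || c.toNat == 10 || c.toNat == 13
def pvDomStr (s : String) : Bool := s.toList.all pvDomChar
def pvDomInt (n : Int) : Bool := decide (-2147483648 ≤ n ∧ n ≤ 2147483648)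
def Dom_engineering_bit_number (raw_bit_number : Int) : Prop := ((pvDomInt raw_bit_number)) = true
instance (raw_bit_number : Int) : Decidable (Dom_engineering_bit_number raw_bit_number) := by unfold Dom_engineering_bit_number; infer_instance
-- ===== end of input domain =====

-- B replaces A's while-loop doubling with the closed form max(8, 1 << (n-1).bit_length()) (idiomatic; same cost class).

-- ===== PORT A =====
-- A's while-loop: power starts at 1, doubles until 2**power >= n. Fuel 8 only makes the
-- recursion total; it is never exhausted for inputs in [1,128] (2^7 = 128 ≥ n at power ≤ 7).
def ebnLoopA (fuel : Nat) (power : Nat) (n : Int) : Nat :=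
  match fuel with
  | 0 => power
  | f + 1 => if (2 : Int) ^ power < n then ebnLoopA f (power + 1) n else power

def engineering_bit_number (raw_bit_number : Int) : Int :=
  if raw_bit_number < 1 ∨ raw_bit_number > 128 then 0  -- Python raises ValueError here (outside Pre_)
  else
    let bit_number := (2 : Int) ^ (ebnLoopA 8 1 raw_bit_number)
    if bit_number < 8 then 8 else bit_number

-- ===== PORT B =====
def engineering_bit_number_alt (raw_bit_number : Int) : Int :=
  if raw_bit_number < 1 ∨ raw_bit_number > 128 then 0  -- Python raises ValueError here (outside Pre_)
  else max 8 ((1 : Int) <<< (Nat.size (raw_bit_number - 1).toNat))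

-- ===== PRECONDITION & SPEC =====
-- Pre_ excludes exactly the inputs on which A raises ValueError.
def Pre_engineering_bit_number (raw_bit_number : Int) : Prop :=
  1 ≤ raw_bit_number ∧ raw_bit_number ≤ 128
instance (raw_bit_number : Int) : Decidable (Pre_engineering_bit_number raw_bit_number) := by
  unfold Pre_engineering_bit_number; infer_instance
def pvWitness_engineering_bit_number : Int := (9)

def Spec_engineering_bit_number (raw_bit_number : Int) (out : Int) : Prop := out = engineering_bit_number_alt raw_bit_number
instance (raw_bit_number : Int) (out : Int) : Decidable (Spec_engineering_bit_number raw_bit_number out) := by unfold Spec_engineering_bit_number; infer_instance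

-- ===== CLAIM (what is proved, stated in full; the proofs are below) =====
def Claim_equal_engineering_bit_number : Prop := ∀ (raw_bit_number : Int), Dom_engineering_bit_number raw_bit_number → Pre_engineering_bit_number raw_bit_number → Spec_engineering_bit_number raw_bit_number (engineering_bit_number raw_bit_number)

-- ===== LEMMAS AND PROOFS =====

-- ===== VERDICT (by name: the statement is the Claim_ definition above) =====
theorem engineering_bit_number_spec : Claim_equal_engineering_bit_number := by
  intro n _ hp
  obtain ⟨h1, h2⟩ := hp
  unfold Spec_engineering_bit_number
  interval_cases n <;> decide
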